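-- pv_equiv track=rewrite | github.com/mmroch4/university | introduction-to-programming/exercises/47/index.py | whichone
-- ===== SOURCE A (Python) =====
-- def whichone(n):
--   r = [1, 2]
--
--   p = 2
--
--   while r[-1] < n:
--     r.append(r[p - 1] + r[p - 2])
--
--     p += 1
--
--   k = n
--   t = p - 1
--
--   while t > 1:
--     left = k <= r[t - 1]
--     right = k >= r[t - 1] + 1
--
--     if right:
--       k -= r[t - 1]
--       t -= 2
--     else:
--       t -= 1
--
--   ans = ["A", "AB"]
--
--   return ans[t][k - 1]
-- ===== SOURCE B (Python) =====
-- def whichone(n):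
--     # The n-th character is 'B' exactly when the Zeckendorf representation of
--     # n - 1 over the Fibonacci numbers 1, 2, 3, 5, ... uses the summand 1.
--     # One recursive greedy pass computes the residual of n - 1 after removing
--     # the Fibonacci numbers >= 2 (largest first); the residual bit picks the letter.
--     def reduce(m, a, b):
--         if b <= m:
--             m = reduce(m, b, a + b)
--         return m - a if a <= m else m
--     return "AB"[reduce(n - 1, 2, 3)]
-- ===== Notes on version B (the rewrite author's own statement) =====
-- stated objective: alternative
-- what changed: B characterizes the answer by the Zeckendorf representation of n-1: a single recursive greedy pass removes the Fibonacci numbers >= 2 from n-1 (largest first) and the residual bit indexes "AB", replacing A's two explicit loops that build a Fibonacci list and descend word indices (k, t) with asymmetric t-1/t-2 branching.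
import Mathlib
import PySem

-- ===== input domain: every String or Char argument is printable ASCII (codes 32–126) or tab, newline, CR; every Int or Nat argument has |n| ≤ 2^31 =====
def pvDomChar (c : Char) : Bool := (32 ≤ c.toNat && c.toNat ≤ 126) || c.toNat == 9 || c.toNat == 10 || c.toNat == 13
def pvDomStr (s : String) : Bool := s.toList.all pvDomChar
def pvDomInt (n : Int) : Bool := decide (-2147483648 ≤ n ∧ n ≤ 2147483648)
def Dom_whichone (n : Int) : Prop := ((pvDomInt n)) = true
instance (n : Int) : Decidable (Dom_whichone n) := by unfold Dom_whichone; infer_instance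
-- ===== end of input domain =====

-- B computes the Zeckendorf residual of n-1 by one recursive greedy pass and indexes "AB"
-- with the residual bit, replacing A's Fibonacci-list build-up and (k, t) index descent
-- (objective: alternative — a different algorithm of the same cost).

-- ===== PORT A =====
-- first while loop: extend r with Fibonacci sums until r[-1] >= n.
-- fuel (n.toNat + 2) is a totality guard only: the loop adds at least 1 to r[-1] each
-- iteration starting from 2, so it always suffices (proved in loop1_run below).
def whichoneLoop1 : Nat → Int → List Int → Int → List Int × Int
  | 0, _, r, p => (r, p)
  | fuel + 1, n, r, p =>
    if PySem.List.pyGetD r (-1) 0 < n then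
      whichoneLoop1 fuel n (r ++ [PySem.List.pyGetD r (p - 1) 0 + PySem.List.pyGetD r (p - 2) 0]) (p + 1)
    else (r, p)

-- second while loop: descend; `right` is A's test k >= r[t-1] + 1 (A's `left` is unused).
def whichoneLoop2 (r : List Int) (k t : Int) : Int × Int :=
  if h : 1 < t then
    if PySem.List.pyGetD r (t - 1) 0 + 1 ≤ k then
      whichoneLoop2 r (k - PySem.List.pyGetD r (t - 1) 0) (t - 2)
    else
      whichoneLoop2 r k (t - 1)
  else (k, t)
termination_by t.toNat
decreasing_by all_goals omega

def whichone (n : Int) : String :=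
  let rp := whichoneLoop1 (n.toNat + 2) n [1, 2] 2
  let kt := whichoneLoop2 rp.1 n (rp.2 - 1)
  let ans : List String := ["A", "AB"]
  -- ans[t][k-1]: Python raises IndexError when either index is out of range (excluded by Pre_)
  match PySem.Str.pyGet? (PySem.List.pyGetD ans kt.2 "") (kt.1 - 1) with
  | some c => String.ofList [c]
  | none => ""

-- ===== PORT B =====
-- Source B's recursive helper `reduce(m, a, b)`: greedily remove from m the Fibonacci numbers
-- a, b, a+b, ... (largest first, by recursing upward and subtracting on the way back).
-- fuel (n.toNat + 2) is a totality guard only: b grows past m in that many steps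
-- (proved sufficient in the main proof).
def whichoneReduce : Nat → Int → Int → Int → Int
  | 0, m, _, _ => m
  | fuel + 1, m, a, b =>
    let m' := if b ≤ m then whichoneReduce fuel m b (a + b) else m
    if a ≤ m' then m' - a else m'

def whichone_alt (n : Int) : String :=
  -- "AB"[reduce(n-1, 2, 3)]: Python raises IndexError when the index is out of range (excluded by Pre_)
  match PySem.Str.pyGet? "AB" (whichoneReduce (n.toNat + 2) (n - 1) 2 3) with
  | some c => String.ofList [c]
  | none => ""

-- ===== PRECONDITION & SPEC =====
-- Pre_ excludes exactly n ≤ -2, where Python A raises IndexError (ans[t][k-1] with k-1 ≤ -3);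
-- B raises IndexError there too ("AB"[m] with m = n-1 ≤ -3).
def Pre_whichone (n : Int) : Prop := -1 ≤ n
instance (n : Int) : Decidable (Pre_whichone n) := by unfold Pre_whichone; infer_instance
def pvWitness_whichone : Int := (5)

def Spec_whichone (n : Int) (out : String) : Prop := out = whichone_alt n
instance (n : Int) (out : String) : Decidable (Spec_whichone n out) := by unfold Spec_whichone; infer_instance

-- ===== CLAIM (what is proved, stated in full; the proofs are below) =====
def Claim_equal_whichone : Prop := ∀ (n : Int), Dom_whichone n → Pre_whichone n → Spec_whichone n (whichone n)

-- ===== LEMMAS AND PROOFS =====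

-- the Fibonacci numbers A's list r holds: 1, 2, 3, 5, ...
def fibN : Nat → Nat
  | 0 => 1
  | 1 => 2
  | i + 2 => fibN (i + 1) + fibN i

-- the Fibonacci words: "A", "AB", "ABA", "ABAAB", ...
def wordF : Nat → List Char
  | 0 => ['A']
  | 1 => ['A', 'B']
  | i + 2 => wordF (i + 1) ++ wordF i

def fibList (m : Nat) : List Int := (List.range m).map (fun j => (fibN j : Int))

-- greedy subtraction of one Fibonacci number, and the descending greedy pass
-- over the levels i+d-1, ..., i+1, i (B's reduce unwinds exactly this way).
def stepF (j : Nat) (m : Int) : Int := if (fibN j : Int) ≤ m then m - fibN j else m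

def resSeg : Nat → Nat → Int → Int
  | _, 0, m => m
  | i, d + 1, m => stepF i (resSeg (i + 1) d m)

lemma wordF_len (i : Nat) : (wordF i).length = fibN i := by
  induction i using wordF.induct <;> simp_all [wordF, fibN]

lemma fibN_lower (i : Nat) : i + 1 ≤ fibN i := by
  induction i using fibN.induct <;> simp_all [fibN]
  all_goals omega

lemma fibN_succ_ge (j : Nat) : fibN j ≤ fibN (j + 1) := by
  cases j with
  | zero => decide
  | succ j =>
    show fibN (j + 1) ≤ fibN (j + 1) + fibN j
    omega

lemma fibN_mono {i j : Nat} (h : i ≤ j) : fibN i ≤ fibN j := by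
  induction j, h using Nat.le_induction with
  | base => exact le_rfl
  | succ j hij ih => exact le_trans ih (fibN_succ_ge j)

lemma fibList_succ (m : Nat) : fibList (m + 1) = fibList m ++ [(fibN m : Int)] := by
  simp [fibList, List.range_succ]

lemma fibList_getD {j m : Nat} (h : j < m) :
    PySem.List.pyGetD (fibList m) (j : Int) 0 = (fibN j : Int) := by
  simp [fibList, PySem.List.pyGetD_natCast, List.getD_eq_getElem?_getD, h]

lemma loop1_run (n : Int) (s : Nat) (hs : n ≤ (fibN (s + 1) : Int))
    (hmin : ∀ j, j < s → (fibN (j + 1) : Int) < n) :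
    ∀ fuel i, i ≤ s → s - i ≤ fuel →
      whichoneLoop1 fuel n (fibList (i + 2)) ((i : Int) + 2) = (fibList (s + 2), (s : Int) + 2) := by
  intro fuel
  induction fuel with
  | zero =>
    intro i hi hf
    have : i = s := by omega
    subst this
    rfl
  | succ fuel ih =>
    intro i hi hf
    rcases eq_or_lt_of_le hi with rfl | hlt
    · -- i = s : the loop condition fails
      have hlast : PySem.List.pyGetD (fibList (i + 2)) (-1) 0 = (fibN (i + 1) : Int) := by
        rw [fibList_succ, PySem.List.pyGetD_neg_one_append_singleton]
      simp [whichoneLoop1, hlast, not_lt.mpr hs]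
    · -- i < s : the loop condition holds, one more element is appended
      have hlast : PySem.List.pyGetD (fibList (i + 2)) (-1) 0 = (fibN (i + 1) : Int) := by
        rw [fibList_succ, PySem.List.pyGetD_neg_one_append_singleton]
      have hcond : PySem.List.pyGetD (fibList (i + 2)) (-1) 0 < n := by
        rw [hlast]; exact hmin i hlt
      have h1 : ((i : Int) + 2) - 1 = ((i + 1 : Nat) : Int) := by push_cast; ring
      have h2 : ((i : Int) + 2) - 2 = ((i : Nat) : Int) := by ring
      have g1 : PySem.List.pyGetD (fibList (i + 2)) (((i : Int) + 2) - 1) 0 = (fibN (i + 1) : Int) := by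
        rw [h1, fibList_getD (by omega)]
      have g2 : PySem.List.pyGetD (fibList (i + 2)) (((i : Int) + 2) - 2) 0 = (fibN i : Int) := by
        rw [h2, fibList_getD (by omega)]
      rw [whichoneLoop1, if_pos hcond, g1, g2]
      have hsum : (fibN (i + 1) : Int) + (fibN i : Int) = (fibN (i + 2) : Int) := by
        push_cast [fibN]; ring
      have happ : fibList (i + 2) ++ [(fibN (i + 1) : Int) + (fibN i : Int)] = fibList (i + 1 + 2) := by
        rw [hsum, ← fibList_succ]
      rw [happ]
      have hp : (i : Int) + 2 + 1 = ((i + 1 : Nat) : Int) + 2 := by push_cast; ring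
      rw [hp]
      exact ih (i + 1) (by omega) (by omega)

lemma loop2_run (p : Nat) :
    ∀ t k : Nat, t < p → 1 ≤ k → k ≤ fibN t →
      ∃ k' t' : Nat, whichoneLoop2 (fibList p) (k : Int) (t : Int) = ((k' : Int), (t' : Int)) ∧
        t' ≤ 1 ∧ 1 ≤ k' ∧ k' ≤ fibN t' ∧ (wordF t')[k' - 1]? = (wordF t)[k - 1]? := by
  intro t
  induction t using Nat.strong_induction_on with
  | _ t IH =>
    intro k htp hk1 hk2
    by_cases hle : t ≤ 1
    · -- loop exits immediately
      refine ⟨k, t, ?_, hle, hk1, hk2, rfl⟩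
      rw [whichoneLoop2]
      rw [dif_neg (by exact_mod_cast not_lt.mpr (by exact_mod_cast hle))]
    · obtain ⟨m, rfl⟩ : ∃ m, t = m + 2 := ⟨t - 2, by omega⟩
      have hcond : (1 : Int) < ((m + 2 : Nat) : Int) := by exact_mod_cast Nat.lt_of_sub_eq_succ rfl
      have h1 : (((m + 2 : Nat) : Int)) - 1 = ((m + 1 : Nat) : Int) := by push_cast; ring
      have g1 : PySem.List.pyGetD (fibList p) ((((m + 2 : Nat) : Int)) - 1) 0 = (fibN (m + 1) : Int) := by
        rw [h1, fibList_getD (by omega)]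
      have hword : wordF (m + 2) = wordF (m + 1) ++ wordF m := rfl
      have hlen1 : (wordF (m + 1)).length = fibN (m + 1) := wordF_len (m + 1)
      rw [whichoneLoop2, dif_pos hcond, g1]
      by_cases hr : (fibN (m + 1) : Int) + 1 ≤ (k : Int)
      · -- right branch: k -= fib(m+1), t -= 2
        rw [if_pos hr]
        have hkfib : fibN (m + 1) + 1 ≤ k := by exact_mod_cast hr
        have hknew : (k : Int) - (fibN (m + 1) : Int) = ((k - fibN (m + 1) : Nat) : Int) := by
          omega
        have htnew : (((m + 2 : Nat) : Int)) - 2 = ((m : Nat) : Int) := by push_cast; ring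
        rw [hknew, htnew]
        have hfib : fibN (m + 2) = fibN (m + 1) + fibN m := rfl
        obtain ⟨k', t', heq, ht', hk1', hk2', hidx⟩ :=
          IH m (by omega) (k - fibN (m + 1)) (by omega) (by omega) (by omega)
        refine ⟨k', t', heq, ht', hk1', hk2', ?_⟩
        rw [hidx, hword, List.getElem?_append_right (by omega)]
        congr 1
        omega
      · -- left branch: t -= 1
        rw [if_neg hr]
        have hkfib : k ≤ fibN (m + 1) := by
          have : (k : Int) ≤ (fibN (m + 1) : Int) := by omega
          exact_mod_cast this
        rw [h1]
        obtain ⟨k', t', heq, ht', hk1', hk2', hidx⟩ :=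
          IH (m + 1) (by omega) k (by omega) hk1 hkfib
        refine ⟨k', t', heq, ht', hk1', hk2', ?_⟩
        rw [hidx, hword, List.getElem?_append_left (by omega)]

-- levels above m are no-ops of the greedy pass
lemma resSeg_stab : ∀ d j (m : Int), m < (fibN j : Int) → resSeg j d m = m := by
  intro d
  induction d with
  | zero => intro j m _; rfl
  | succ d ih =>
    intro j m hm
    have hmono : (fibN j : Int) ≤ (fibN (j + 1) : Int) := by
      exact_mod_cast fibN_mono (by omega)
    rw [resSeg, ih (j + 1) m (by omega), stepF, if_neg (by omega)]

-- B's reduce IS the descending greedy pass: frame (a, b) = (fibN i, fibN (i+1)) recurses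
-- upward and subtracts its own Fibonacci number on the way back.
lemma reduce_eq_resSeg : ∀ fuel i (m : Int),
    whichoneReduce fuel m (fibN i) (fibN (i + 1)) = resSeg i fuel m := by
  intro fuel
  induction fuel with
  | zero => intro i m; rfl
  | succ fuel ih =>
    intro i m
    rw [whichoneReduce, resSeg]
    by_cases hb : (fibN (i + 1) : Int) ≤ m
    · have hsum : (fibN i : Int) + (fibN (i + 1) : Int) = (fibN (i + 2) : Int) := by
        push_cast [fibN]; ring
      rw [if_pos hb, hsum, ih (i + 1) m, stepF]
    · rw [if_neg hb, resSeg_stab fuel (i + 1) m (by omega), stepF]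

-- peel the TOPMOST (largest) step off the greedy pass
lemma resSeg_top : ∀ d i (m : Int), resSeg i (d + 1) m = resSeg i d (stepF (i + d) m) := by
  intro d
  induction d with
  | zero => intro i m; simp [resSeg]
  | succ d ih =>
    intro i m
    rw [resSeg, ih (i + 1) m, show i + (d + 1) = i + 1 + d by omega]
    rfl

lemma resSeg_trunc : ∀ D t (m : Int), t ≤ D → m < (fibN t : Int) →
    resSeg 1 D m = resSeg 1 t m := by
  intro D
  induction D with
  | zero => intro t m ht _; interval_cases t; rfl
  | succ D ih =>
    intro t m ht hm
    rcases eq_or_lt_of_le ht with rfl | hlt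
    · rfl
    · have hmono : (fibN t : Int) ≤ (fibN (1 + D) : Int) := by
        exact_mod_cast fibN_mono (by omega)
      rw [resSeg_top D 1 m, stepF, if_neg (by omega)]
      exact ih t m (by omega) hm

-- the character of the Fibonacci word at 0-based index m is picked by the greedy residual
lemma word_char : ∀ t, ∀ m : Nat, m < fibN t →
    0 ≤ resSeg 1 t (m : Int) ∧ resSeg 1 t (m : Int) ≤ 1 ∧
      (wordF t)[m]? = some (if resSeg 1 t (m : Int) = 1 then 'B' else 'A') := by
  intro t
  induction t using Nat.strong_induction_on with
  | _ t IH =>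
    match t with
    | 0 =>
      intro m hm
      have hm0 : m = 0 := by
        have h1 : fibN 0 = 1 := rfl
        omega
      subst hm0
      exact ⟨by decide, by decide, by decide⟩
    | 1 =>
      intro m hm
      have hm2 : m < 2 := by
        have h1 : fibN 1 = 2 := rfl
        omega
      interval_cases m <;> exact ⟨by decide, by decide, by decide⟩
    | t + 2 =>
      intro m hm
      have hlen : (wordF (t + 1)).length = fibN (t + 1) := wordF_len (t + 1)
      have hword : wordF (t + 2) = wordF (t + 1) ++ wordF t := rfl
      have hfib : fibN (t + 2) = fibN (t + 1) + fibN t := rfl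
      -- peel the no-op level t+2, then the level-(t+1) step, off the greedy pass
      have htop : resSeg 1 (t + 2) (m : Int) = resSeg 1 (t + 1) (m : Int) := by
        have h := resSeg_top (t + 1) 1 (m : Int)
        rw [show 1 + (t + 1) = t + 2 from by omega] at h
        rw [h, stepF, if_neg (by exact_mod_cast not_le.mpr hm)]
      have hpeel : resSeg 1 (t + 1) (m : Int) = resSeg 1 t (stepF (t + 1) (m : Int)) := by
        have h := resSeg_top t 1 (m : Int)
        rw [show 1 + t = t + 1 from by omega] at h
        exact h
      by_cases hc : m < fibN (t + 1)
      · -- left half of the word: the level-(t+1) step is a no-op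
        have hstep : stepF (t + 1) (m : Int) = (m : Int) := by
          rw [stepF, if_neg (by exact_mod_cast not_le.mpr (by exact_mod_cast hc))]
        obtain ⟨h0, h1, hch⟩ := IH (t + 1) (by omega) m hc
        refine ⟨by rw [htop]; exact h0, by rw [htop]; exact h1, ?_⟩
        rw [hword, List.getElem?_append_left (by omega), hch, htop]
      · -- right half: level t+1 fires, the residual is that of m - fibN (t+1)
        have hstep : stepF (t + 1) (m : Int) = ((m - fibN (t + 1) : Nat) : Int) := by
          rw [stepF, if_pos (by exact_mod_cast not_lt.mp hc)]
          omega
        have hm' : m - fibN (t + 1) < fibN t := by omega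
        obtain ⟨h0, h1, hch⟩ := IH t (by omega) (m - fibN (t + 1)) hm'
        refine ⟨by rw [htop, hpeel, hstep]; exact h0, by rw [htop, hpeel, hstep]; exact h1, ?_⟩
        rw [hword, List.getElem?_append_right (by omega), htop, hpeel, hstep]
        rw [show m - (wordF (t + 1)).length = m - fibN (t + 1) by omega]
        exact hch

lemma fib1_val : fibN 1 = 2 := rfl

lemma str_side (t' : Nat) (ht' : t' ≤ 1) :
    (PySem.List.pyGetD ["A", "AB"] (t' : Int) "").toList = wordF t' := by
  interval_cases t' <;> decide

theorem whichone_spec : Claim_equal_whichone := by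
  unfold Claim_equal_whichone
  intro n hdom hpre
  unfold Spec_whichone whichone whichone_alt
  have h02 : ([1, 2] : List Int) = fibList 2 := by decide
  by_cases hn : n ≤ 2
  · -- small case: A's loops do nothing and B's reduce subtracts nothing;
    -- both read "AB"[n-1] (n ∈ {-1, 0, 1, 2})
    have hA1 : whichoneLoop1 (n.toNat + 2) n [1, 2] 2 = ([1, 2], 2) := by
      show whichoneLoop1 (n.toNat + 1 + 1) n [1, 2] 2 = ([1, 2], 2)
      rw [whichoneLoop1]
      rw [show PySem.List.pyGetD [1, 2] (-1) 0 = (2 : Int) from by decide, if_neg (by omega)]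
    have hA2 : whichoneLoop2 [1, 2] n ((2 : Int) - 1) = (n, 1) := by
      rw [whichoneLoop2]
      norm_num
    have hB : whichoneReduce (n.toNat + 2) (n - 1) 2 3 = n - 1 := by
      show whichoneReduce (n.toNat + 1 + 1) (n - 1) 2 3 = n - 1
      rw [whichoneReduce]
      rw [if_neg (show ¬ (3 : Int) ≤ n - 1 from by omega)]
      show (if (2 : Int) ≤ n - 1 then (n - 1) - 2 else n - 1) = n - 1
      rw [if_neg (by omega)]
    simp only [hA1, hA2, hB]
    rw [show PySem.List.pyGetD ["A", "AB"] (1 : Int) "" = "AB" from by decide]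
  · -- large case: A's descent reads the character of wordF (s+1) at index n-1,
    -- which word_char identifies with B's greedy residual of n-1
    rw [not_le] at hn
    have hex : ∃ i, n ≤ (fibN (i + 1) : Int) := by
      refine ⟨n.toNat, ?_⟩
      have := fibN_lower (n.toNat + 1)
      omega
    set s := Nat.find hex with hsdef
    have hs : n ≤ (fibN (s + 1) : Int) := Nat.find_spec hex
    have hmin : ∀ j, j < s → (fibN (j + 1) : Int) < n := by
      intro j hj
      have := Nat.find_min hex hj
      omega
    have hs1 : 1 ≤ s := by
      by_contra h
      have : s = 0 := by omega
      rw [this, fib1_val] at hs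
      norm_num at hs
      omega
    have hsle : s ≤ n.toNat := by
      have h := hmin (s - 1) (by omega)
      rw [Nat.sub_add_cancel hs1] at h
      have h2 := fibN_lower s
      omega
    -- A's side
    have hA : whichoneLoop1 (n.toNat + 2) n [1, 2] 2 = (fibList (s + 2), (s : Int) + 2) := by
      rw [h02, show (2 : Int) = ((0 : Nat) : Int) + 2 by norm_num]
      exact loop1_run n s hs hmin _ 0 (by omega) (by omega)
    have hkfib : n.toNat ≤ fibN (s + 1) := by omega
    obtain ⟨k', t', heq, ht', hk1, hk2, hidx⟩ :=
      loop2_run (s + 2) (s + 1) n.toNat (by omega) (by omega) hkfib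
    have harg : whichoneLoop2 (fibList (s + 2)) n ((s : Int) + 2 - 1) = ((k' : Int), (t' : Int)) := by
      rw [show (s : Int) + 2 - 1 = ((s + 1 : Nat) : Int) by push_cast; ring,
          show n = ((n.toNat : Nat) : Int) by omega]
      exact heq
    -- B's side: reduce = greedy residual at the word's level
    have hBr : whichoneReduce (n.toNat + 2) (n - 1) 2 3 = resSeg 1 (s + 1) (n - 1) := by
      rw [show (2 : Int) = (fibN 1 : Int) by rfl, show (3 : Int) = (fibN (1 + 1) : Int) by rfl,
          reduce_eq_resSeg]
      exact resSeg_trunc (n.toNat + 2) (s + 1) (n - 1) (by omega) (by omega)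
    -- identify both characters via word_char at m = n.toNat - 1
    obtain ⟨h0, h1, hch⟩ := word_char (s + 1) (n.toNat - 1) (by omega)
    have hcast : ((n.toNat - 1 : Nat) : Int) = n - 1 := by omega
    rw [hcast] at h0 h1 hch
    simp only [hA, hBr, harg]
    have hAchar : PySem.Str.pyGet? (PySem.List.pyGetD ["A", "AB"] (t' : Int) "") ((k' : Int) - 1)
        = (wordF (s + 1))[n.toNat - 1]? := by
      rw [show (k' : Int) - 1 = ((k' - 1 : Nat) : Int) by omega]
      simp only [PySem.Str.pyGet?_natCast]
      rw [str_side t' ht', hidx]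
    rw [hAchar, hch]
    by_cases hr1 : resSeg 1 (s + 1) (n - 1) = 1
    · rw [hr1]
      rfl
    · have hr0 : resSeg 1 (s + 1) (n - 1) = 0 := by omega
      rw [hr0]
      simp only [if_neg (by omega : ¬ (0 : Int) = 1)]
      rfl
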